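-- pv_equiv track=rewrite | github.com/vortexntnu/vortex-acoustics | Python/correlation/correlation.py | cut_signals
-- ===== SOURCE A (Python) =====
-- def cut_signals(
--     frame,
--     signals,
-- ):
--
--     """
--
--     Args:
--         frame:
--         signals:
--
--     Returns:
--         A matrix "signals" where for every signal,values outside the frame are zero
--     """
--
--     for i in range(len(signals)):
--         for j in range(len(signals[i])):
--             if j < frame[0] or j > frame[1]:
--                 signals[i][j] = 0
--     return signals
-- ===== SOURCE B (Python) =====
-- def cut_signals(
--     frame,
--     signals,
-- ):
--     # Zero the two regions outside the frame with slice assignment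
--     # (clamped bounds reproduce the strict-comparison semantics of index tests).
--     for i in range(len(signals)):
--         row = signals[i]
--         n = len(row)
--         lo = max(0, min(frame[0], n))
--         hi = max(0, min(frame[1] + 1, n))
--         row[:lo] = [0] * lo
--         row[hi:] = [0] * (n - hi)
--     return signals
-- ===== Notes on version B (the rewrite author's own statement) =====
-- stated objective: simpler
-- what changed: Replaces the per-element inner loop with an if-test by two clamped slice assignments that zero the prefix before frame[0] and the suffix after frame[1] in one step per row.
import Mathlib
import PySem

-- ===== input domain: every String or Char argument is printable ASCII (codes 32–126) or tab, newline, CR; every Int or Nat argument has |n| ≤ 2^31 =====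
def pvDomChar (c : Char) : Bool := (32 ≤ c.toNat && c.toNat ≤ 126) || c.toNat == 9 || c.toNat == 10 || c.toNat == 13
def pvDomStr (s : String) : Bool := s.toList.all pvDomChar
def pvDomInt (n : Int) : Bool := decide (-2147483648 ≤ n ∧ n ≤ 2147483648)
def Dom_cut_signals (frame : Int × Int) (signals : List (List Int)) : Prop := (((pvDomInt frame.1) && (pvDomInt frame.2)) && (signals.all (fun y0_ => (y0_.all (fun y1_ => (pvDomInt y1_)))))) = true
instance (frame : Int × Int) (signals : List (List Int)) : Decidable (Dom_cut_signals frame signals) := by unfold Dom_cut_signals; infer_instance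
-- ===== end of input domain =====

-- B zeroes the prefix/suffix outside the frame with two clamped slice assignments per row
-- instead of A's per-element if-test loop (objective: simpler). Both Pythons mutate
-- `signals` in place identically; the theorem below is about the returned value.

-- ===== PORT A =====
-- literal port of A's nested index loops: for i in range(len(signals)):
--   for j in range(len(signals[i])): if j < frame[0] or j > frame[1]: signals[i][j] = 0
def cut_signals (frame : Int × Int) (signals : List (List Int)) : List (List Int) :=
  (PySem.List.pyRange 0 (signals.length : Int) 1).foldl (fun sigs i =>
    (PySem.List.pyRange 0 ((PySem.List.pyGetD sigs i []).length : Int) 1).foldl (fun sigs j =>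
      if j < frame.1 ∨ frame.2 < j then
        sigs.set i.toNat ((PySem.List.pyGetD sigs i []).set j.toNat 0)
      else sigs) sigs) signals

-- ===== PORT B =====
-- per-row slice surgery of Source B: row[:lo] = [0]*lo ; row[hi:] = [0]*(n-hi) with clamped lo, hi
def cutRowB (frame : Int × Int) (row : List Int) : List Int :=
  let n : Int := row.length
  let lo := (max 0 (min frame.1 n)).toNat
  let hi := (max 0 (min (frame.2 + 1) n)).toNat
  let row1 := List.replicate lo 0 ++ row.drop lo
  row1.take hi ++ List.replicate (row.length - hi) 0

def cut_signals_alt (frame : Int × Int) (signals : List (List Int)) : List (List Int) :=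
  (PySem.List.pyRange 0 (signals.length : Int) 1).foldl (fun sigs i =>
    sigs.set i.toNat (cutRowB frame (PySem.List.pyGetD sigs i []))) signals

-- ===== PRECONDITION & SPEC =====
def Spec_cut_signals (frame : Int × Int) (signals : List (List Int)) (out : List (List Int)) : Prop := out = cut_signals_alt frame signals
instance (frame : Int × Int) (signals : List (List Int)) (out : List (List Int)) : Decidable (Spec_cut_signals frame signals out) := by unfold Spec_cut_signals; infer_instance

-- ===== CLAIM (what is proved, stated in full; the proofs are below) =====
def Claim_equal_cut_signals : Prop := ∀ (frame : Int × Int) (signals : List (List Int)), Dom_cut_signals frame signals → Spec_cut_signals frame signals (cut_signals frame signals)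

-- ===== LEMMAS AND PROOFS =====

-- row-level version of A's inner loop
def cutRowA (frame : Int × Int) (row : List Int) : List Int :=
  (PySem.List.pyRange 0 (row.length : Int) 1).foldl (fun r j =>
    if j < frame.1 ∨ frame.2 < j then r.set j.toNat 0 else r) row

-- characterisation of a truncated run of A's inner loop
lemma cutRowA_partial (frame : Int × Int) (row : List Int) (m : Nat) (hm : m ≤ row.length) :
    ∃ r, (PySem.List.pyRange 0 (m : Int) 1).foldl (fun r j =>
        if j < frame.1 ∨ frame.2 < j then r.set j.toNat 0 else r) row = r ∧
      r.length = row.length ∧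
      ∀ k (hk : k < row.length) (hk' : k < r.length),
        r[k]'hk' = if k < m ∧ ((k : Int) < frame.1 ∨ frame.2 < (k : Int)) then 0
                   else row[k] := by
  induction m with
  | zero =>
      refine ⟨row, by simp [PySem.List.pyRange_one_eq_nil], rfl, ?_⟩
      intro k hk hk'; simp
  | succ m ih =>
      obtain ⟨r, hfold, hlen, hget⟩ := ih (by omega)
      have hsplit : PySem.List.pyRange 0 ((m + 1 : Nat) : Int) 1
          = PySem.List.pyRange 0 (m : Int) 1 ++ [(m : Int)] := by
        have := PySem.List.pyRange_one_succ_right (a := 0) (b := (m : Int)) (by positivity)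
        push_cast
        push_cast at this
        exact this
      rw [hsplit, List.foldl_append, hfold]
      simp only [List.foldl_cons, List.foldl_nil]
      by_cases hc : (m : Int) < frame.1 ∨ frame.2 < (m : Int)
      · refine ⟨r.set m 0, by simp [hc], by simpa using hlen, ?_⟩
        intro k hk hk'
        rw [List.getElem_set]
        by_cases hkm : m = k
        · subst hkm; simp [hc]
        · rw [if_neg hkm, hget k hk (by omega)]
          have : (k < m + 1 ∧ ((k : Int) < frame.1 ∨ frame.2 < (k : Int)))
              ↔ (k < m ∧ ((k : Int) < frame.1 ∨ frame.2 < (k : Int))) := by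
            constructor
            · rintro ⟨h1, h2⟩; exact ⟨by omega, h2⟩
            · rintro ⟨h1, h2⟩; exact ⟨by omega, h2⟩
          rw [if_congr this rfl rfl]
      · refine ⟨r, by simp [hc], hlen, ?_⟩
        intro k hk hk'
        rw [hget k hk hk']
        congr 1
        simp only [eq_iff_iff]
        constructor
        · rintro ⟨h1, h2⟩
          refine ⟨?_, h2⟩
          by_cases h : k = m
          · exact absurd h2 (h ▸ hc)
          · omega
        · rintro ⟨h1, h2⟩; exact ⟨by omega, h2⟩

-- the core row lemma: A's per-element loop equals B's slice surgery
lemma cutRow_eq (frame : Int × Int) (row : List Int) :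
    cutRowA frame row = cutRowB frame row := by
  obtain ⟨r, hfold, hlen, hget⟩ := cutRowA_partial frame row row.length le_rfl
  have hA : cutRowA frame row = r := by
    unfold cutRowA; exact hfold
  set n := row.length with hn
  have hlo : (max 0 (min frame.1 (n : Int))).toNat ≤ n := by omega
  have hhi : (max 0 (min (frame.2 + 1) (n : Int))).toNat ≤ n := by omega
  set lo := (max 0 (min frame.1 (n : Int))).toNat with hloe
  set hi := (max 0 (min (frame.2 + 1) (n : Int))).toNat with hhie
  have hrow1len : (List.replicate lo (0 : Int) ++ row.drop lo).length = n := by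
    simp; omega
  have hBlen : (cutRowB frame row).length = n := by
    unfold cutRowB
    simp only [← hn, ← hloe, ← hhie]
    simp [hrow1len]
    omega
  rw [hA]
  apply List.ext_getElem (by rw [hlen, hBlen])
  intro k hk1 hk2
  have hkn : k < n := by omega
  rw [hget k hkn (by omega)]
  -- evaluate B's element at k
  have hB : (cutRowB frame row)[k]'(hk2)
      = if k < hi then (if k < lo then 0 else row[k]'hkn) else 0 := by
    unfold cutRowB
    simp only [← hn, ← hloe, ← hhie]
    by_cases hkhi : k < hi
    · rw [List.getElem_append_left (by simp [hrow1len]; omega)]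
      rw [List.getElem_take]
      by_cases hklo : k < lo
      · rw [List.getElem_append_left (by simpa using hklo)]
        simp [hkhi, hklo]
      · rw [List.getElem_append_right (by simpa using hklo)]
        simp only [List.length_replicate]
        rw [List.getElem_drop]
        simp only [hkhi, if_true, hklo, if_false]
        congr 1
        omega
    · rw [List.getElem_append_right (by simp [hrow1len]; omega)]
      simp [hkhi]
  rw [hB]
  have hlo' : (lo : Int) = max 0 (min frame.1 (n : Int)) := by omega
  have hhi' : (hi : Int) = max 0 (min (frame.2 + 1) (n : Int)) := by omega
  have c1 : ((k : Int) < frame.1) ↔ k < lo := by omega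
  have c2 : (frame.2 < (k : Int)) ↔ ¬ k < hi := by omega
  by_cases hl : k < lo <;> by_cases hh : k < hi
  · rw [if_pos ⟨hkn, Or.inl (c1.mpr hl)⟩, if_pos hh, if_pos hl]
  · rw [if_pos ⟨hkn, Or.inl (c1.mpr hl)⟩, if_neg hh]
  · rw [if_neg ?_, if_pos hh, if_neg hl]
    rintro ⟨-, h | h⟩
    · exact hl (c1.mp h)
    · exact (c2.mp h) hh
  · rw [if_pos ⟨hkn, Or.inr (c2.mpr hh)⟩, if_neg hh]

-- A's inner loop over the whole matrix = set row i to cutRowA of row i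
lemma innerA_eq (frame : Int × Int) (L : List Int) (i : Int)
    (hi0 : 0 ≤ i) :
    ∀ (sigs : List (List Int)), i.toNat < sigs.length →
      L.foldl (fun s j =>
        if j < frame.1 ∨ frame.2 < j then
          s.set i.toNat ((PySem.List.pyGetD s i []).set j.toNat 0)
        else s) sigs
      = sigs.set i.toNat
          (L.foldl (fun r j => if j < frame.1 ∨ frame.2 < j then r.set j.toNat 0 else r)
            (PySem.List.pyGetD sigs i [])) := by
  have hii : i = ((i.toNat : Nat) : Int) := by omega
  have hgd : ∀ (s : List (List Int)) (hs : i.toNat < s.length),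
      PySem.List.pyGetD s i [] = s[i.toNat]'hs := by
    intro s hs
    have h1 : PySem.List.pyGetD s i [] = s.getD i.toNat [] := by
      rw [hii, PySem.List.pyGetD_natCast, Int.toNat_natCast]
    rw [h1, List.getD_eq_getElem _ _ hs]
  induction L with
  | nil =>
      intro sigs hil
      simp only [List.foldl_nil]
      rw [hgd sigs hil]
      exact (List.set_getElem_self ..).symm
  | cons j L ih =>
      intro sigs hil
      simp only [List.foldl_cons]
      by_cases hc : j < frame.1 ∨ frame.2 < j
      · rw [if_pos hc, if_pos hc]
        have hl2 : i.toNat < (sigs.set i.toNat ((PySem.List.pyGetD sigs i []).set j.toNat 0)).length := by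
          simpa using hil
        have hget : PySem.List.pyGetD
            (sigs.set i.toNat ((PySem.List.pyGetD sigs i []).set j.toNat 0)) i []
            = (PySem.List.pyGetD sigs i []).set j.toNat 0 := by
          rw [hgd _ hl2]
          simp
        rw [ih _ hl2, hget, List.set_set]
      · rw [if_neg hc, if_neg hc, ih _ hil]

-- ===== VERDICT (by name: the statement is the Claim_ definition above) =====
theorem cut_signals_spec : Claim_equal_cut_signals := by
  intro frame signals _
  unfold Spec_cut_signals cut_signals cut_signals_alt
  have key : ∀ (L : List Int), (∀ i ∈ L, 0 ≤ i ∧ i < (signals.length : Int)) →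
      ∀ (sigs : List (List Int)), sigs.length = signals.length →
      L.foldl (fun sigs i =>
        (PySem.List.pyRange 0 ((PySem.List.pyGetD sigs i []).length : Int) 1).foldl
          (fun sigs j =>
            if j < frame.1 ∨ frame.2 < j then
              sigs.set i.toNat ((PySem.List.pyGetD sigs i []).set j.toNat 0)
            else sigs) sigs) sigs
      = L.foldl (fun sigs i =>
          sigs.set i.toNat (cutRowB frame (PySem.List.pyGetD sigs i []))) sigs := by
    intro L
    induction L with
    | nil => intro _ sigs _; rfl
    | cons i L ih =>
        intro hmem sigs hlen
        obtain ⟨hi0, hiu⟩ := hmem i (List.mem_cons_self ..)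
        have hil : i.toNat < sigs.length := by omega
        simp only [List.foldl_cons]
        rw [innerA_eq frame _ i hi0 sigs hil]
        rw [← cutRow_eq frame (PySem.List.pyGetD sigs i [])]
        unfold cutRowA
        exact ih (fun x hx => hmem x (List.mem_cons_of_mem _ hx)) _ (by simpa using hlen)
  exact (key (PySem.List.pyRange 0 (signals.length : Int) 1)
    (fun i hi => PySem.List.mem_pyRange_one.mp hi) signals rfl)
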